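/- GENERATED by mk_final_copies.py from the proof of the farm's unit `predict_point` (farm:predict_point.1: Proof.lean) as the
   re-elaboration sweep compiled it — do not edit. -/
import Vorbis.Spec.Units.predict_point

open X86 X86.User Asan Vorbis

set_option maxRecDepth 4000
set_option maxHeartbeats 4000000

namespace Vorbis.Spec.predict_point

/-- The `idiv r13d` at 0x108669 (C line 1968, `err / adx`) does not raise #DE: the dividend `edx:eax` is the sign extension of
`eax` (the `cdq` before it) and the divisor is a positive `int`, so the quotient fits 32 bits. -/
theorem div_some (a d : BitVec 32) (hd : d ≠ 0) (hpos : d.msb = false) :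
    Alu.div true (if a.msb = true then BitVec.allOnes 32 else 0) a d ≠ none := by
  unfold Alu.div
  simp only []
  have hd' : (d == 0) = false := by
    simpa using hd
  rw [hd']
  simp only [Bool.false_eq_true, if_false, if_true]
  -- the quotient of the 64-bit signed division is the sign extension of its low half
  have key : ((((if a.msb = true then BitVec.allOnes 32 else 0) ++ a).sdiv
        (BitVec.signExtend (32 + 32) d)).setWidth 32).signExtend (32 + 32) =
      ((if a.msb = true then BitVec.allOnes 32 else 0) ++ a).sdiv (BitVec.signExtend (32 + 32) d) := by
    bv_decide
  rw [key]
  simp only [bne_self_eq_false, Bool.false_eq_true, if_false]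
  exact Option.some_ne_none _

/-- `adx = x1 - x0` (C line 1965) is a positive `int` when `0 ≤ x0 < x1 < 2^31` (the precondition). -/
theorem sub_pos (x1 x0 : BitVec 32) (hlo : x0.toNat < x1.toNat) (hhi : x1.toNat < 2 ^ 31) :
    x1 - x0 ≠ 0 ∧ (x1 - x0).msb = false := by
  have h1 : x0 < x1 := BitVec.lt_def.mpr hlo
  have h2 : x1 < 0x80000000#32 := BitVec.lt_def.mpr hhi
  bv_decide

/-- A 32-bit result written to a register is below `2^32` (the post's `eax`). -/
theorem ofBV32_lt (x : BitVec 32) : (Word.ofBV x).toNat < 2 ^ 32 := by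
  unfold Word.ofBV
  simp only [UInt64.toNat_ofBitVec, BitVec.toNat_setWidth]
  omega

end Vorbis.Spec.predict_point

/-- `predict_point` satisfies its contract: five pushes, the call of `abs`, the `idiv` (no #DE: `adx > 0`), two arms, five pops. -/
theorem Vorbis.Spec.Worked.predict_point_ok : Vorbis.Spec.predict_point.Statement := by
  intro Lay hLay μ hμ u₀ hcode habs others frames u ret he hpre
  v_entry he
  have habs' := habs others frames
  obtain ⟨hsh, hlo, hhi⟩ := hpre
  -- the divisor `adx = x1 - x0` is a positive `int`
  have hlo' : (Word.part .w32 (u.reg .rsi)).toNat < (Word.part .w32 (u.reg .rdx)).toNat := by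
    rw [Vorbis.toNat_part32, Vorbis.toNat_part32]
    exact hlo
  have hhi' : (Word.part .w32 (u.reg .rdx)).toNat < 2 ^ 31 := by
    rw [Vorbis.toNat_part32]
    exact hhi
  obtain ⟨hadx0, hadxpos⟩ := Vorbis.Spec.predict_point.sub_pos _ _ hlo' hhi'
  u_walk hcode [hμ.vendor] span [Vorbis.L.textLo, Vorbis.L.textHi] side (v_side)
  · -- call_inv at 0x10865d
    v_inv
  · -- the precondition of `abs` at 0x10865d (C line 1967)
    show ShadowPre others frames s_10865d
    refine hsh.callee ?_ ?_ ?_ ?_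
    · v_untouched
    · rw [w_rsp]
      u_omega
    · rw [w_rsp]
      u_omega
    · rw [w_rsp]
      u_omega
  · -- cut point: after the call at 0x10865d
    have hp1 : UInt64.ofNat (s_10865d.mem.readLE (u.reg .rsp - 8) 8) = u.reg .r14 := by u_resolve
    have hp2 : UInt64.ofNat (s_10865d.mem.readLE (u.reg .rsp - 16) 8) = u.reg .r13 := by u_resolve
    have hp3 : UInt64.ofNat (s_10865d.mem.readLE (u.reg .rsp - 24) 8) = u.reg .r12 := by u_resolve
    have hp4 : UInt64.ofNat (s_10865d.mem.readLE (u.reg .rsp - 32) 8) = u.reg .rbp := by u_resolve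
    have hp5 : UInt64.ofNat (s_10865d.mem.readLE (u.reg .rsp - 40) 8) = u.reg .rbx := by u_resolve
    v_after_call w_rsp_10865d w_mem_10865d
    rw [w_mem_10865d] at hp1 hp2 hp3 hp4 hp5
    have hs0 : UInt64.ofNat (s_10865dr.mem.readLE (u.reg .rsp) 8) = ret := by
      u_frame he_retAddr
    have hs1 : UInt64.ofNat (s_10865dr.mem.readLE (u.reg .rsp - 8) 8) = u.reg .r14 := by
      u_frame hp1
    have hs2 : UInt64.ofNat (s_10865dr.mem.readLE (u.reg .rsp - 16) 8) = u.reg .r13 := by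
      u_frame hp2
    have hs3 : UInt64.ofNat (s_10865dr.mem.readLE (u.reg .rsp - 24) 8) = u.reg .r12 := by
      u_frame hp3
    have hs4 : UInt64.ofNat (s_10865dr.mem.readLE (u.reg .rsp - 32) 8) = u.reg .rbp := by
      u_frame hp4
    have hs5 : UInt64.ofNat (s_10865dr.mem.readLE (u.reg .rsp - 40) 8) = u.reg .rbx := by
      u_frame hp5
    obtain ⟨hrax, hun1⟩ := w_post
    obtain ⟨z, w_rax⟩ : ∃ z, s_10865dr.reg .rax = z := ⟨_, rfl⟩
    u_walk hcode [hμ.vendor] span [Vorbis.L.textLo, Vorbis.L.textHi] side (v_side)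
    · -- side_nofault: the `idiv r13d` at 0x108669 (C line 1968) does not raise #DE
      exact Vorbis.Spec.predict_point.div_some _ _ hadx0 hadxpos hopt1
    · -- `dy < 0` (C line 1969): `y0 - off`, walked to the `ret` at 0x10867d
      refine ReachVia.done ?_
      v_returned
      refine ⟨?_, ?_⟩
      · v_untouched
      · rw [w_rax]
        exact Vorbis.Spec.predict_point.ofBV32_lt _
    · -- `dy ≥ 0` (C line 1969): `y0 + off`, walked to the `ret` at 0x10867d
      refine ReachVia.done ?_
      v_returned
      refine ⟨?_, ?_⟩
      · v_untouched
      · rw [w_rax]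
        exact Vorbis.Spec.predict_point.ofBV32_lt _
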